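-- pv_equiv track=rewrite | github.com/changpil/pyPractice | CodingInterviews/Sessions/Recursion/nQueens.py | stringGrid
-- ===== SOURCE A (Python) =====
-- def stringGrid(n, points):
--     sg = []
--     for i in range(n):
--         line = []
--         for j in range(n):
--             if (i, j) not in points:
--                 line.append("-")
--             else:
--                 line.append("q")
--         sg.append("".join(line))
--     return sg
-- ===== SOURCE B (Python) =====
-- def stringGrid(n, points):
--     grid = [["-"] * n for _ in range(n)]
--     for (r, c) in points:
--         if 0 <= r < n and 0 <= c < n:
--             grid[r][c] = "q"
--     return ["".join(row) for row in grid]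
-- ===== Notes on version B (the rewrite author's own statement) =====
-- stated objective: faster
-- what changed: B allocates an n-by-n grid of '-' once and writes 'q' only at the in-range coordinates listed in points, instead of testing membership of every cell in points.
import Mathlib
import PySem

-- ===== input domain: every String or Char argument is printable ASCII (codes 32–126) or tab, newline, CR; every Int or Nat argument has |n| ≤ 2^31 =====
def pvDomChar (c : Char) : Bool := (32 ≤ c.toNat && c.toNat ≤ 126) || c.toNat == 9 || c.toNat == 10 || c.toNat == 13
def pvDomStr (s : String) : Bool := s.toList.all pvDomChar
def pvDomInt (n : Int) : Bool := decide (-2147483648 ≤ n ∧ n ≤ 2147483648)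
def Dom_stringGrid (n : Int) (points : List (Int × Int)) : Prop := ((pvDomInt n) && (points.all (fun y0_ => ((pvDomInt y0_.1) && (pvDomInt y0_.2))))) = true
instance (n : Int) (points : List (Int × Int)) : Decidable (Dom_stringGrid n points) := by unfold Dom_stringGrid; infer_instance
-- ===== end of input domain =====

-- B builds the n×n '-' grid once and writes 'q' only at the in-range points, instead of A's per-cell membership scan of points.

-- ===== PORT A =====
def stringGrid (n : Int) (points : List (Int × Int)) : List String :=
  (PySem.List.pyRange 0 n 1).foldl (fun sg i =>
    let line := (PySem.List.pyRange 0 n 1).foldl (fun line j =>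
      if (i, j) ∉ points then line ++ ["-"] else line ++ ["q"]) ([] : List String)
    sg ++ [PySem.Str.join "" line]) []

-- ===== PORT B =====
-- grid[r][c] = "q"  (r, c already bounds-checked by the caller, so the Nat indices are exact)
def pvSetCell (g : List (List String)) (r c : Nat) : List (List String) :=
  g.set r ((g[r]?.getD []).set c "q")

def stringGrid_alt (n : Int) (points : List (Int × Int)) : List String :=
  (points.foldl (fun g p =>
      if 0 ≤ p.1 ∧ p.1 < n ∧ 0 ≤ p.2 ∧ p.2 < n then pvSetCell g p.1.toNat p.2.toNat else g)
    ((PySem.List.pyRange 0 n 1).map (fun _ => List.replicate n.toNat "-"))).map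
    (fun row => PySem.Str.join "" row)

-- ===== PRECONDITION & SPEC =====
def Spec_stringGrid (n : Int) (points : List (Int × Int)) (out : List String) : Prop := out = stringGrid_alt n points
instance (n : Int) (points : List (Int × Int)) (out : List String) : Decidable (Spec_stringGrid n points out) := by unfold Spec_stringGrid; infer_instance

-- ===== CLAIM (what is proved, stated in full; the proofs are below) =====
def Claim_equal_stringGrid : Prop := ∀ (n : Int) (points : List (Int × Int)), Dom_stringGrid n points → Spec_stringGrid n points (stringGrid n points)

-- ===== LEMMAS AND PROOFS =====

-- the common cellwise description of both grids
def pvCell (points : List (Int × Int)) (i j : Nat) : String :=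
  if ((i : Int), (j : Int)) ∈ points then "q" else "-"

def pvTarget (n : Int) (points : List (Int × Int)) : List (List String) :=
  (List.range n.toNat).map (fun i => (List.range n.toNat).map (fun j => pvCell points i j))

-- A's inner loop is a map over the range
lemma inner_eq_map (n i : Int) (points : List (Int × Int)) :
    (PySem.List.pyRange 0 n 1).foldl (fun line j =>
      if (i, j) ∉ points then line ++ ["-"] else line ++ ["q"]) ([] : List String)
    = (PySem.List.pyRange 0 n 1).map (fun j => if (i, j) ∈ points then "q" else "-") := by
  have h : ∀ (acc : List String) (j : Int),
      (if (i, j) ∉ points then acc ++ ["-"] else acc ++ ["q"])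
      = acc ++ [if (i, j) ∈ points then "q" else "-"] := by
    intro acc j; by_cases hm : (i, j) ∈ points <;> simp [hm]
  calc (PySem.List.pyRange 0 n 1).foldl (fun line j =>
        if (i, j) ∉ points then line ++ ["-"] else line ++ ["q"]) ([] : List String)
      = (PySem.List.pyRange 0 n 1).foldl (fun line j =>
        line ++ [if (i, j) ∈ points then "q" else "-"]) ([] : List String) := by
        simp only [h]
    _ = _ := by
        simpa using PySem.List.foldl_append_singleton_eq_map
          (f := fun j => if (i, j) ∈ points then "q" else "-")
          (l := PySem.List.pyRange 0 n 1) (acc := [])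

lemma stringGrid_eq_target (n : Int) (points : List (Int × Int)) :
    stringGrid n points = (pvTarget n points).map (fun row => PySem.Str.join "" row) := by
  unfold stringGrid pvTarget pvCell
  simp only [inner_eq_map]
  rw [PySem.List.foldl_append_singleton_eq_map]
  simp [PySem.List.pyRange_one, List.map_map, Function.comp]
  exact fun a _ => rfl

-- B's initial grid is the n×n '-' grid
lemma grid0_eq (n : Int) :
    (PySem.List.pyRange 0 n 1).map (fun _ => List.replicate n.toNat ("-" : String))
    = List.replicate n.toNat (List.replicate n.toNat "-") := by
  rw [List.map_const']
  simp [PySem.List.length_pyRange_one]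

-- the shape invariant kept by B's point loop
def pvShape (N : Nat) (g : List (List String)) : Prop :=
  g.length = N ∧ ∀ i, i < N → (g[i]?.getD []).length = N

lemma shape_setCell {N : Nat} {g : List (List String)} (hg : pvShape N g) (r c : Nat) :
    pvShape N (pvSetCell g r c) := by
  obtain ⟨hlen, hrow⟩ := hg
  refine ⟨by simp [pvSetCell, hlen], ?_⟩
  intro i hi
  by_cases hir : i = r
  · subst hir
    have hi' : i < g.length := by omega
    simp [pvSetCell, List.getElem?_set_self hi', List.getElem?_eq_getElem hi']
    have := hrow i hi
    simpa [List.getElem?_eq_getElem hi'] using this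
  · simp [pvSetCell, List.getElem?_set_ne (by omega : r ≠ i)]
    exact hrow i hi

lemma fold_shape (n : Int) (pts : List (Int × Int)) :
    ∀ (g : List (List String)), pvShape n.toNat g →
    pvShape n.toNat (pts.foldl (fun g p =>
      if 0 ≤ p.1 ∧ p.1 < n ∧ 0 ≤ p.2 ∧ p.2 < n then pvSetCell g p.1.toNat p.2.toNat else g) g) := by
  induction pts with
  | nil => intro g hg; simpa using hg
  | cons p pts ih =>
    intro g hg
    rw [List.foldl_cons]
    by_cases hr : 0 ≤ p.1 ∧ p.1 < n ∧ 0 ≤ p.2 ∧ p.2 < n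
    · rw [if_pos hr]; exact ih _ (shape_setCell hg _ _)
    · rw [if_neg hr]; exact ih _ hg

-- cell value after B's point loop, for in-range cells
lemma fold_cell (n : Int) (pts : List (Int × Int)) :
    ∀ (g : List (List String)), pvShape n.toNat g →
    ∀ i j : Nat, i < n.toNat → j < n.toNat →
    (((pts.foldl (fun g p =>
        if 0 ≤ p.1 ∧ p.1 < n ∧ 0 ≤ p.2 ∧ p.2 < n then pvSetCell g p.1.toNat p.2.toNat else g) g)[i]?.getD [])[j]?.getD "")
    = if ((i : Int), (j : Int)) ∈ pts then "q" else ((g[i]?.getD [])[j]?.getD "") := by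
  induction pts with
  | nil => intro g hg i j hi hj; simp
  | cons p pts ih =>
    intro g hg i j hi hj
    obtain ⟨r, c⟩ := p
    rw [List.foldl_cons]
    by_cases hr : 0 ≤ r ∧ r < n ∧ 0 ≤ c ∧ c < n
    · rw [if_pos hr, ih _ (shape_setCell hg _ _) i j hi hj]
      by_cases hmem : ((i : Int), (j : Int)) ∈ pts
      · simp [hmem]
      · simp only [hmem, if_neg, not_false_iff, List.mem_cons]
        by_cases heq : ((i : Int), (j : Int)) = (r, c)
        · -- this point sets exactly cell (i, j)
          have hri : r.toNat = i := by
            have : (i : Int) = r := by simpa using congrArg Prod.fst heq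
            omega
          have hcj : c.toNat = j := by
            have : (j : Int) = c := by simpa using congrArg Prod.snd heq
            omega
          have hgl : i < g.length := by have := hg.1; omega
          have hrl : j < (g[i]?.getD []).length := by
            have := hg.2 i hi; omega
          simp [heq, hmem, pvSetCell, hri, hcj,
            List.getElem?_set_self hgl, List.getElem?_eq_getElem hgl]
          rw [List.getElem?_set_self]
          · simp
          · simpa [List.getElem?_eq_getElem hgl] using hrl
        · -- a different cell is set
          simp only [heq, hmem, or_self, if_neg, not_false_iff]
          by_cases hri : r.toNat = i
          · have hci : c.toNat ≠ j := by
              intro hcj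
              apply heq
              have : (r : Int) = i := by omega
              have : (c : Int) = j := by omega
              simp_all
            have hgl : i < g.length := by have := hg.1; omega
            simp [pvSetCell, hri, List.getElem?_set_self hgl,
              List.getElem?_eq_getElem hgl, List.getElem?_set_ne hci]
          · simp [pvSetCell, List.getElem?_set_ne hri]
    · rw [if_neg hr, ih _ hg i j hi hj]
      have hnp : ((i : Int), (j : Int)) ≠ (r, c) := by
        intro h
        apply hr
        have h1 : (i : Int) = r := by simpa using congrArg Prod.fst h
        have h2 : (j : Int) = c := by simpa using congrArg Prod.snd h
        refine ⟨by omega, by omega, by omega, by omega⟩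
      by_cases hmem : ((i : Int), (j : Int)) ∈ pts <;> simp [hmem, hnp]

lemma grid0_shape (n : Int) :
    pvShape n.toNat (List.replicate n.toNat (List.replicate n.toNat ("-" : String))) := by
  refine ⟨by simp, ?_⟩
  intro i hi
  have hl : i < (List.replicate n.toNat (List.replicate n.toNat ("-" : String))).length := by simpa using hi
  simp [List.getElem?_eq_getElem hl]

-- B's grid after the point loop is the common target grid
lemma grid_eq_target (n : Int) (points : List (Int × Int)) :
    points.foldl (fun g p =>
      if 0 ≤ p.1 ∧ p.1 < n ∧ 0 ≤ p.2 ∧ p.2 < n then pvSetCell g p.1.toNat p.2.toNat else g)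
      ((PySem.List.pyRange 0 n 1).map (fun _ => List.replicate n.toNat "-"))
    = pvTarget n points := by
  rw [grid0_eq]
  set g0 := List.replicate n.toNat (List.replicate n.toNat ("-" : String)) with hg0
  have hsh := fold_shape n points g0 (grid0_shape n)
  set res := points.foldl (fun g p =>
    if 0 ≤ p.1 ∧ p.1 < n ∧ 0 ≤ p.2 ∧ p.2 < n then pvSetCell g p.1.toNat p.2.toNat else g) g0 with hres
  apply List.ext_getElem
  · simp [hsh.1, pvTarget]
  · intro i h1 h2
    have hi : i < n.toNat := by
      have := hsh.1; omega
    have hrow : (res[i]?.getD []).length = n.toNat := hsh.2 i hi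
    have hres_i : res[i]?.getD [] = res[i] := by
      simp [List.getElem?_eq_getElem h1]
    apply List.ext_getElem
    · rw [← hres_i, hrow]
      simp [pvTarget, hi]
    · intro j hj1 hj2
      have hj : j < n.toNat := by
        rw [← hres_i, hrow] at hj1; exact hj1
      have hcell := fold_cell n points g0 (grid0_shape n) i j hi hj
      have hg0cell : ((g0[i]?.getD [])[j]?.getD "") = "-" := by
        have hg0i : i < g0.length := by simp [hg0]; omega
        have : g0[i] = List.replicate n.toNat "-" := by simp [hg0]
        simp [List.getElem?_eq_getElem hg0i, this, List.getElem?_eq_getElem, hj,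
          List.getElem_replicate]
      rw [← hres] at hcell
      have hleft : res[i][j] = ((res[i]?.getD [])[j]?.getD "") := by
        rw [hres_i]
        have : j < res[i].length := by rw [← hres_i, hrow]; exact hj
        simp [List.getElem?_eq_getElem this]
      rw [hleft, hcell, hg0cell]
      simp [pvTarget, pvCell, hi, hj]

-- ===== VERDICT (by name: the statement is the Claim_ definition above) =====
theorem stringGrid_spec : Claim_equal_stringGrid := by
  intro n points _
  unfold Spec_stringGrid stringGrid_alt
  rw [stringGrid_eq_target, grid_eq_target]
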